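-- pv_equiv track=rewrite | github.com/fjaviergallucci/mia-ao-ag2 | ag2.py | CI
-- ===== SOURCE A (Python) =====
-- def CI(s, costes):
--     valor = 0
--     # Valores establecidos
--     for i in range(len(s)):
--         valor += costes[i][s[i]]
--
--     # Estimacion
--     for i in range(len(s), len(costes)):
--         values = [costes[j][i] for j in range(len(s), len(costes))]
--         aux = min(values)
--         valor += aux
--     return valor
-- ===== SOURCE B (Python) =====
-- def CI(s, costes):
--     n = len(s)
--     m = len(costes)
--     valor = sum(costes[i][s[i]] for i in range(n))
--     # Lower bound: running per-column minima of the free submatrix, row-major.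
--     mins = None
--     for j in range(n, m):
--         row = costes[j][n:m]
--         if mins is None:
--             mins = row
--         else:
--             mins = [x if x < y else y for x, y in zip(mins, row)]
--     return valor + (sum(mins) if mins is not None else 0)
-- ===== Notes on version B (the rewrite author's own statement) =====
-- stated objective: alternative
-- what changed: The per-column minima of the free submatrix are computed in one row-major pass that folds each sliced row into a running minima vector with zip, instead of re-scanning every column of the matrix to build a list and take min of it.
import Mathlib
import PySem

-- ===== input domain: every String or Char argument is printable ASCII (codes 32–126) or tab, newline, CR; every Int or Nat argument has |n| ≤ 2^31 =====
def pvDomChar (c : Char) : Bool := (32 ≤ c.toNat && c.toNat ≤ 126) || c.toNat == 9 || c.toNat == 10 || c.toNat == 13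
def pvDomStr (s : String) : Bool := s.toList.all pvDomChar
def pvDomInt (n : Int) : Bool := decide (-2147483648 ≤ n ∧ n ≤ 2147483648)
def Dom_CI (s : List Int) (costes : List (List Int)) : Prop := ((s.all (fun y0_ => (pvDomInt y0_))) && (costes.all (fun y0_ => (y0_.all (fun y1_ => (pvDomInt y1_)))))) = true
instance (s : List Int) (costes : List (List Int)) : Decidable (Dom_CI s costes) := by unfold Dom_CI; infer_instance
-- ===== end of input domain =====

-- B replaces A's column-by-column rescans of the free submatrix by one row-major pass
-- folding sliced rows into a running per-column-minima vector (alternative decomposition, same cost).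

-- ===== PORT A =====
def CI (s : List Int) (costes : List (List Int)) : Int :=
  let valor : Int := (PySem.List.pyRange 0 (s.length : Int) 1).foldl
    (fun v i => v + (PySem.List.pyGet? ((PySem.List.pyGet? costes i).getD [])
                      ((PySem.List.pyGet? s i).getD 0)).getD 0) 0
  (PySem.List.pyRange (s.length : Int) (costes.length : Int) 1).foldl
    (fun v i =>
      let values := (PySem.List.pyRange (s.length : Int) (costes.length : Int) 1).map
        (fun j => (PySem.List.pyGet? ((PySem.List.pyGet? costes j).getD []) i).getD 0)
      let aux := (PySem.List.min? values (fun x => x)).getD 0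
      v + aux) valor

-- ===== PORT B =====
def CI_alt (s : List Int) (costes : List (List Int)) : Int :=
  let n : Int := (s.length : Int)
  let m : Int := (costes.length : Int)
  let valor : Int := ((PySem.List.pyRange 0 n 1).map
    (fun i => (PySem.List.pyGet? ((PySem.List.pyGet? costes i).getD [])
                ((PySem.List.pyGet? s i).getD 0)).getD 0)).sum
  let mins : Option (List Int) := (PySem.List.pyRange n m 1).foldl
    (fun acc j =>
      let row := PySem.List.slice ((PySem.List.pyGet? costes j).getD []) (some n) (some m)
      match acc with
      | none => some row
      | some ms => some ((ms.zip row).map (fun p => if p.1 < p.2 then p.1 else p.2)))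
    none
  valor + (match mins with | none => 0 | some l => l.sum)

-- ===== PRECONDITION & SPEC =====
-- Exactly the inputs on which Python A returns (no IndexError from costes[i], s-indexing,
-- or the free submatrix): len(s) ≤ len(costes), each s[i] a valid (possibly negative)
-- index into costes[i], and every free row long enough for every free column.
def Pre_CI (s : List Int) (costes : List (List Int)) : Prop :=
  s.length ≤ costes.length ∧
  (∀ i : Nat, i < s.length →
    PySem.Raise.InRange (costes.getD i []).length (s.getD i 0)) ∧
  (∀ j : Nat, s.length ≤ j → j < costes.length →
    costes.length ≤ (costes.getD j []).length)
instance (s : List Int) (costes : List (List Int)) : Decidable (Pre_CI s costes) := by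
  unfold Pre_CI; infer_instance
def pvWitness_CI : List Int × List (List Int) :=
  ([1, 0], [[4, 7], [2, 9], [5, 1, 3, 0], [8, 6, 0, 2]])
def Spec_CI (s : List Int) (costes : List (List Int)) (out : Int) : Prop := out = CI_alt s costes
instance (s : List Int) (costes : List (List Int)) (out : Int) : Decidable (Spec_CI s costes out) := by unfold Spec_CI; infer_instance

-- ===== CLAIM (what is proved, stated in full; the proofs are below) =====
def Claim_equal_CI : Prop := ∀ (s : List Int) (costes : List (List Int)), Dom_CI s costes → Pre_CI s costes → Spec_CI s costes (CI s costes)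

-- ===== LEMMAS AND PROOFS =====

-- entry of costes at row j, column i, as both ports read it
def pvC (costes : List (List Int)) (j i : Int) : Int :=
  (PySem.List.pyGet? ((PySem.List.pyGet? costes j).getD []) i).getD 0

-- the zip-min step of B
def pvZ (ms row : List Int) : List Int :=
  (ms.zip row).map (fun p => if p.1 < p.2 then p.1 else p.2)

lemma pvZ_length (ms row : List Int) (h : row.length = ms.length) :
    (pvZ ms row).length = ms.length := by
  simp [pvZ, h]

lemma pvZ_eq_zipWith : ∀ ms row : List Int, pvZ ms row = List.zipWith min ms row := by
  intro ms
  induction ms with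
  | nil => intro row; simp [pvZ]
  | cons x t ih =>
    intro row
    cases row with
    | nil => simp [pvZ]
    | cons y r =>
      have hmin : (if x < y then x else y) = min x y := by rw [min_def]; split_ifs <;> omega
      simpa [pvZ, List.zip_cons_cons, hmin] using ih r

lemma pvZ_getD (ms row : List Int) (h : row.length = ms.length) (k : Nat) (hk : k < ms.length) :
    (pvZ ms row).getD k 0 = min (ms.getD k 0) (row.getD k 0) := by
  have hk' : k < row.length := by omega
  rw [pvZ_eq_zipWith]
  simp [List.getD_eq_getElem?_getD, List.getElem?_zipWith, List.getElem?_eq_getElem hk,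
    List.getElem?_eq_getElem hk']

-- folding pvZ over rows keeps the length
lemma pvFold_length (rowf : Int → List Int) (rows : List Int) :
    ∀ ms : List Int, (∀ j ∈ rows, (rowf j).length = ms.length) →
      (rows.foldl (fun a j => pvZ a (rowf j)) ms).length = ms.length := by
  induction rows with
  | nil => intro ms _; rfl
  | cons j t ih =>
    intro ms h
    have hj : (rowf j).length = ms.length := h j (by simp)
    have hlen : (pvZ ms (rowf j)).length = ms.length := pvZ_length _ _ hj
    simpa [List.foldl_cons, hlen] using ih (pvZ ms (rowf j))
      (by intro x hx; rw [hlen]; exact h x (by simp [hx]))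

-- elementwise value of the fold: running minimum down the column
lemma pvFold_getD (rowf : Int → List Int) (rows : List Int) :
    ∀ ms : List Int, (∀ j ∈ rows, (rowf j).length = ms.length) →
    ∀ k : Nat, k < ms.length →
      (rows.foldl (fun a j => pvZ a (rowf j)) ms).getD k 0 =
        rows.foldl (fun a j => min a ((rowf j).getD k 0)) (ms.getD k 0) := by
  induction rows with
  | nil => intro ms _ k _; rfl
  | cons j t ih =>
    intro ms h k hk
    have hj : (rowf j).length = ms.length := h j (by simp)
    have hlen : (pvZ ms (rowf j)).length = ms.length := pvZ_length _ _ hj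
    have := ih (pvZ ms (rowf j))
      (by intro x hx; rw [hlen]; exact h x (by simp [hx])) k (by omega)
    simp only [List.foldl_cons, this, pvZ_getD ms (rowf j) hj k hk]

-- row j of the free submatrix, as B slices it
def pvRowf (costes : List (List Int)) (n m : Int) (j : Int) : List Int :=
  PySem.List.slice ((PySem.List.pyGet? costes j).getD []) (some n) (some m)

lemma pvRowf_length (costes : List (List Int)) (N : Nat) (j : Int)
    (hj : (N : Int) ≤ j) (hj2 : j < (costes.length : Int))
    (h3 : ∀ j : Nat, N ≤ j → j < costes.length → costes.length ≤ (costes.getD j []).length) :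
    (pvRowf costes (N : Int) (costes.length : Int) j).length = costes.length - N := by
  have h0 : 0 ≤ j := le_trans (by exact_mod_cast Nat.zero_le N) hj
  have hrow : ((PySem.List.pyGet? costes j).getD []) = costes.getD j.toNat [] := by
    rw [PySem.List.pyGet?_of_nonneg costes h0, List.getD_eq_getElem?_getD]
  have hlen : costes.length ≤ (costes.getD j.toNat []).length :=
    h3 j.toNat (by omega) (by omega)
  rw [pvRowf, hrow, PySem.List.slice_natCast]
  simp only [List.length_take, List.length_drop]
  omega

lemma pvRowf_getD (costes : List (List Int)) (N : Nat) (j : Int)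
    (hj : (N : Int) ≤ j) (hj2 : j < (costes.length : Int))
    (h3 : ∀ j : Nat, N ≤ j → j < costes.length → costes.length ≤ (costes.getD j []).length)
    (k : Nat) (hk : k < costes.length - N) :
    (pvRowf costes (N : Int) (costes.length : Int) j).getD k 0 =
      pvC costes j ((N : Int) + (k : Int)) := by
  have h0 : 0 ≤ j := le_trans (by exact_mod_cast Nat.zero_le N) hj
  have hrow : ((PySem.List.pyGet? costes j).getD []) = costes.getD j.toNat [] := by
    rw [PySem.List.pyGet?_of_nonneg costes h0, List.getD_eq_getElem?_getD]
  have hlen : costes.length ≤ (costes.getD j.toNat []).length :=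
    h3 j.toNat (by omega) (by omega)
  have h0nk : (0 : Int) ≤ (N : Int) + (k : Int) := by positivity
  have hnk : ((N : Int) + (k : Int)).toNat = N + k := by omega
  rw [pvRowf, pvC, hrow, PySem.List.slice_natCast, PySem.List.pyGet?_of_nonneg _ h0nk, hnk]
  have hk2 : N + k < (costes.getD j.toNat []).length := by omega
  simp [List.getD_eq_getElem?_getD, List.getElem?_drop, hk]

-- B's option-fold with the literal slice step (as it appears in CI_alt after zeta)
lemma pvFoldOptSlice (costes : List (List Int)) (n m : Int) (rows : List Int) : ∀ ms : List Int,
    rows.foldl (fun acc j =>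
        match acc with
        | none => some (PySem.List.slice ((PySem.List.pyGet? costes j).getD []) (some n) (some m))
        | some ms' => some ((ms'.zip (PySem.List.slice ((PySem.List.pyGet? costes j).getD [])
            (some n) (some m))).map (fun p => if p.1 < p.2 then p.1 else p.2))) (some ms)
      = some (rows.foldl (fun a j => pvZ a (pvRowf costes n m j)) ms) := by
  induction rows with
  | nil => intro ms; rfl
  | cons j t ih => intro ms; simpa [pvZ, pvRowf] using ih ((ms.zip (pvRowf costes n m j)).map
      (fun p => if p.1 < p.2 then p.1 else p.2))

-- the estimation loop of A equals the minima-vector sum of B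
lemma pvEstimate (costes : List (List Int)) (N : Nat)
    (h3 : ∀ j : Nat, N ≤ j → j < costes.length → costes.length ≤ (costes.getD j []).length) :
    (match
        (PySem.List.pyRange (N : Int) (costes.length : Int) 1).foldl
          (fun acc j =>
            match acc with
            | none => some (PySem.List.slice ((PySem.List.pyGet? costes j).getD [])
                (some (N : Int)) (some (costes.length : Int)))
            | some ms => some ((ms.zip (PySem.List.slice ((PySem.List.pyGet? costes j).getD [])
                (some (N : Int)) (some (costes.length : Int)))).map
                  (fun p => if p.1 < p.2 then p.1 else p.2)))
          none with
      | none => 0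
      | some l => l.sum)
    = ((PySem.List.pyRange (N : Int) (costes.length : Int) 1).map
        (fun i => (PySem.List.min? ((PySem.List.pyRange (N : Int) (costes.length : Int) 1).map
            (fun j => (PySem.List.pyGet? ((PySem.List.pyGet? costes j).getD []) i).getD 0))
          (fun x => x)).getD 0)).sum := by
  by_cases hlt : N < costes.length
  · have hltI : (N : Int) < (costes.length : Int) := by exact_mod_cast hlt
    set M := costes.length with hM
    set rest := PySem.List.pyRange ((N : Int) + 1) (M : Int) 1 with hrest
    set L := rest.foldl (fun a j => pvZ a (pvRowf costes (N : Int) (M : Int) j))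
      (pvRowf costes (N : Int) (M : Int) (N : Int)) with hL
    have hmemrest : ∀ j ∈ rest, (N : Int) ≤ j ∧ j < (M : Int) := by
      intro j hj
      have := (PySem.List.mem_pyRange_one).mp hj
      omega
    have hlen0 : (pvRowf costes (N : Int) (M : Int) (N : Int)).length = M - N :=
      pvRowf_length costes N _ le_rfl hltI h3
    have hlenmem : ∀ j ∈ rest, (pvRowf costes (N : Int) (M : Int) j).length
        = (pvRowf costes (N : Int) (M : Int) (N : Int)).length := by
      intro j hj
      rw [hlen0, pvRowf_length costes N j (hmemrest j hj).1 (hmemrest j hj).2 h3]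
    have hLlen : L.length = M - N := by
      rw [hL, pvFold_length _ _ _ hlenmem, hlen0]
    have hfold : (PySem.List.pyRange (N : Int) (M : Int) 1).foldl
        (fun acc j =>
          match acc with
          | none => some (PySem.List.slice ((PySem.List.pyGet? costes j).getD [])
              (some (N : Int)) (some (M : Int)))
          | some ms => some ((ms.zip (PySem.List.slice ((PySem.List.pyGet? costes j).getD [])
              (some (N : Int)) (some (M : Int)))).map
                (fun p => if p.1 < p.2 then p.1 else p.2)))
        none = some L := by
      rw [PySem.List.pyRange_one_cons hltI]
      simp only [List.foldl_cons]
      rw [pvFoldOptSlice]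
      rfl
    rw [hfold]
    show L.sum = _
    congr 1
    apply List.ext_getElem
    · rw [hLlen]
      simp [PySem.List.length_pyRange_one]
    · intro k hk1 hk2
      have hkMN : k < M - N := by omega
      rw [← List.getD_eq_getElem _ 0 hk1]
      rw [hL, pvFold_getD _ _ _ hlenmem k (by omega)]
      have hinit : (pvRowf costes (N : Int) (M : Int) (N : Int)).getD k 0
          = pvC costes (N : Int) ((N : Int) + (k : Int)) :=
        pvRowf_getD costes N _ le_rfl hltI h3 k hkMN
      have hstep : rest.foldl (fun a j => min a ((pvRowf costes (N : Int) (M : Int) j).getD k 0))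
            ((pvRowf costes (N : Int) (M : Int) (N : Int)).getD k 0)
          = rest.foldl (fun a j => min a (pvC costes j ((N : Int) + (k : Int))))
            (pvC costes (N : Int) ((N : Int) + (k : Int))) := by
        rw [hinit]
        apply PySem.List.foldl_congr_mem
        intro acc j hj
        rw [pvRowf_getD costes N j (hmemrest j hj).1 (hmemrest j hj).2 h3 k hkMN]
      rw [hstep]
      -- right-hand side: peel the first row off the column minimum
      rw [List.getElem_map, PySem.List.getElem_pyRange_one]
      rw [PySem.List.pyRange_one_cons hltI, List.map_cons, PySem.List.min?_id_cons]
      rw [Option.getD_some, List.foldl_map]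
      rfl
  · rw [PySem.List.pyRange_one_eq_nil (by exact_mod_cast Nat.le_of_not_lt hlt)]
    rfl

-- ===== VERDICT (by name: the statement is the Claim_ definition above) =====
theorem CI_spec : Claim_equal_CI := by
  intro s costes _ hpre
  obtain ⟨h1, h2, h3⟩ := hpre
  unfold Spec_CI
  simp only [CI, CI_alt]
  rw [PySem.List.foldl_add, PySem.List.foldl_add]
  rw [pvEstimate costes s.length h3]
  ring
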